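-- pv_equiv track=rewrite | github.com/mrbartrns/absolutecoding | main.py | solve
-- ===== SOURCE A (Python) =====
-- def solve(n):
--     i = 0
--     number = 0
--     flag = True
--     if n == 1:
--         return 1
--     else:
--         while flag:
--             if 3 * (i - 1) * (i - 2) + 1 < n <= 3 * i * (i - 1) + 1:
--                 number = i
--                 flag = False
--             else:
--                 i += 1
--
--     return number
-- ===== SOURCE B (Python) =====
-- def _isqrt_iter(a, guess):
--     nxt = (guess + a // guess) // 2
--     if nxt < guess:
--         return _isqrt_iter(a, nxt)
--     return guess
--
--
-- def solve(n):
--     if n <= 1: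
--         return 1
--     # ring m is the smallest i with 3*i*(i-1)+1 >= n, i.e. (6i-3)^2 >= 12n-3:
--     # m = ceil((ceil(sqrt(12n-3)) + 3) / 6), computed with an integer Newton sqrt.
--     d = 12 * n - 4                      # = (12n-3) - 1, so isqrt(d)+1 = ceil(sqrt(12n-3))
--     c = _isqrt_iter(d, d) + 1
--     return (c + 8) // 6
-- ===== Notes on version B (the rewrite author's own statement) =====
-- stated objective: faster
-- what changed: Replaces the linear scan over ring indices i by a closed-form solution of the quadratic 3i(i-1)+1 >= n, using an integer Newton isqrt, O(log n) instead of O(sqrt n).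
-- outside the precondition, e.g. on solve(0): A does not finish within the time limit, B returns 1
import Mathlib
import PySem

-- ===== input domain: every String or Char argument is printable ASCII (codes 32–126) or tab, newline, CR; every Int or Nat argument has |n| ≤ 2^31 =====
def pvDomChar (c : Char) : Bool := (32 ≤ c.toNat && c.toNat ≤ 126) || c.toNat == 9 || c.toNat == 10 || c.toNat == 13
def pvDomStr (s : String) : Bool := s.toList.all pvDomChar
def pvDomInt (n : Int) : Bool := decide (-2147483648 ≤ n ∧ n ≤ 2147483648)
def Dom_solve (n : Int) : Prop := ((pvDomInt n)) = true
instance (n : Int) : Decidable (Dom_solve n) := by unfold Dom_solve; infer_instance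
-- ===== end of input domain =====

-- B replaces A's linear scan over ring indices by a closed-form solution of the quadratic
-- 3i(i-1)+1 >= n via an integer Newton square root (objective: faster, asymptotically).

-- ===== PORT A =====
-- A's `while flag` loop, scanning i = 0, 1, 2, …; fuel is a totality guard only
-- (the loop terminates for every n ≥ 2, and n.toNat + 2 steps always suffice there;
-- on fuel exhaustion we return `number`'s initial value 0, unreachable under Pre_).
def solveLoop (n : Int) : Nat → Int → Int
  | 0, _ => 0
  | fuel+1, i =>
    if 3 * (i - 1) * (i - 2) + 1 < n ∧ n ≤ 3 * i * (i - 1) + 1 then i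
    else solveLoop n fuel (i + 1)

def solve (n : Int) : Int :=
  if n = 1 then 1 else solveLoop n (n.toNat + 2) 0

-- ===== PORT B =====
-- B's recursive Newton iteration `_isqrt_iter`; fuel is a totality guard only
-- (each step strictly decreases the positive guess, so guess.toNat + 1 steps suffice).
def isqrtIter (a : Int) : Nat → Int → Int
  | 0, guess => guess
  | fuel+1, guess =>
    let nxt := PySem.Int.floordiv (guess + PySem.Int.floordiv a guess) 2
    if nxt < guess then isqrtIter a fuel nxt else guess

def solve_alt (n : Int) : Int :=
  if n ≤ 1 then 1
  else
    let d := 12 * n - 4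
    let c := isqrtIter d (d.toNat + 1) d + 1
    PySem.Int.floordiv (c + 8) 6

-- ===== PRECONDITION & SPEC =====
-- Pre_ excludes n ≤ 0, on which A's while-loop never terminates (A returns no value there).
def Pre_solve (n : Int) : Prop := 1 ≤ n
instance (n : Int) : Decidable (Pre_solve n) := by unfold Pre_solve; infer_instance
def pvWitness_solve : Int := 3

def Spec_solve (n : Int) (out : Int) : Prop := out = solve_alt n
instance (n : Int) (out : Int) : Decidable (Spec_solve n out) := by unfold Spec_solve; infer_instance

-- ===== CLAIM (what is proved, stated in full; the proofs are below) =====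
def Claim_equal_solve : Prop := ∀ (n : Int), Dom_solve n → Pre_solve n → Spec_solve n (solve n)

-- ===== LEMMAS AND PROOFS =====

-- One Newton step from a positive guess keeps the guess positive and keeps a < (guess+1)².
lemma newton_step (a g : Int) (ha : 1 ≤ a) (hg : 1 ≤ g) :
    1 ≤ PySem.Int.floordiv (g + PySem.Int.floordiv a g) 2 ∧
      a < (PySem.Int.floordiv (g + PySem.Int.floordiv a g) 2 + 1) *
          (PySem.Int.floordiv (g + PySem.Int.floordiv a g) 2 + 1) := by
  rw [PySem.Int.floordiv_eq_ediv_of_pos (by omega : (0:Int) < g),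
      PySem.Int.floordiv_eq_ediv_of_pos (by norm_num : (0:Int) < 2)]
  have h1 := Int.emod_nonneg a (by omega : g ≠ 0)
  have h2 := Int.emod_lt_of_pos a (by omega : (0:Int) < g)
  have h3 := Int.mul_ediv_add_emod a g
  set q := a / g with hq
  have hqr : g * q ≤ a ∧ a < g * q + g := by constructor <;> omega
  have hq0 : 0 ≤ q := Int.ediv_nonneg (by omega) (by omega)
  have h4 := Int.emod_nonneg (g + q) (by norm_num : (2:Int) ≠ 0)
  have h5 := Int.emod_lt_of_pos (g + q) (by norm_num : (0:Int) < 2)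
  have h6 := Int.mul_ediv_add_emod (g + q) 2
  set s := (g + q) / 2 with hs
  have hsr : 2 * s ≤ g + q ∧ g + q < 2 * s + 2 := by constructor <;> omega
  have hgq2 : 2 ≤ g + q := by
    rcases eq_or_lt_of_le hg with h | h
    · have : q = a := by rw [hq, ← h]; simp
      omega
    · omega
  refine ⟨by omega, ?_⟩
  nlinarith [sq_nonneg (g - q - 1), hqr.1, hqr.2, hsr.1, hsr.2]

-- When the iteration stops (next guess not smaller), the guess is a lower square root.
lemma newton_stop (a g : Int) (hg : 1 ≤ g)
    (h : ¬ PySem.Int.floordiv (g + PySem.Int.floordiv a g) 2 < g) : g * g ≤ a := by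
  rw [PySem.Int.floordiv_eq_ediv_of_pos (by omega : (0:Int) < g),
      PySem.Int.floordiv_eq_ediv_of_pos (by norm_num : (0:Int) < 2)] at h
  have h1 := Int.emod_nonneg a (by omega : g ≠ 0)
  have h3 := Int.mul_ediv_add_emod a g
  set q := a / g with hq
  have hqr : g * q ≤ a := by omega
  have hs : g ≤ (g + q) / 2 := by omega
  have h4 := Int.emod_nonneg (g + q) (by norm_num : (2:Int) ≠ 0)
  have h6 := Int.mul_ediv_add_emod (g + q) 2
  have hsr : 2 * ((g + q) / 2) ≤ g + q := by omega
  have hgq : g ≤ q := by omega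
  nlinarith

-- Invariant: enough fuel and a valid bracketing guess give the floor square root.
lemma newton_inv (a : Int) (ha : 1 ≤ a) :
    ∀ (fuel : Nat) (g : Int), 1 ≤ g → a < (g + 1) * (g + 1) → g.toNat ≤ fuel →
      1 ≤ isqrtIter a fuel g ∧ isqrtIter a fuel g * isqrtIter a fuel g ≤ a ∧
        a < (isqrtIter a fuel g + 1) * (isqrtIter a fuel g + 1) := by
  intro fuel
  induction fuel with
  | zero => intro g hg _ hfuel; omega
  | succ fuel ih =>
    intro g hg hub hfuel
    simp only [isqrtIter]
    split
    · rename_i hlt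
      obtain ⟨h1, h2⟩ := newton_step a g ha hg
      exact ih _ h1 h2 (by omega)
    · rename_i hge
      exact ⟨hg, newton_stop a g hg hge, hub⟩

lemma newton_main (d : Int) (hd : 1 ≤ d) :
    1 ≤ isqrtIter d (d.toNat + 1) d ∧
      isqrtIter d (d.toNat + 1) d * isqrtIter d (d.toNat + 1) d ≤ d ∧
        d < (isqrtIter d (d.toNat + 1) d + 1) * (isqrtIter d (d.toNat + 1) d + 1) :=
  newton_inv d hd (d.toNat + 1) d hd (by nlinarith) (by omega)

-- A's loop returns the unique bracketing index m when started below it with enough fuel.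
lemma loop_finds (n m : Int) (hm : 3 * (m - 1) * (m - 2) + 1 < n ∧ n ≤ 3 * m * (m - 1) + 1)
    (hlt : ∀ j : Int, 0 ≤ j → j < m → ¬ (3 * (j - 1) * (j - 2) + 1 < n ∧ n ≤ 3 * j * (j - 1) + 1)) :
    ∀ (fuel : Nat) (i : Int), 0 ≤ i → i ≤ m → (m - i).toNat < fuel → solveLoop n fuel i = m := by
  intro fuel
  induction fuel with
  | zero => intro i _ _ h; omega
  | succ fuel ih =>
    intro i hi0 him hfuel
    simp only [solveLoop]
    split
    · rename_i hc
      by_contra hne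
      exact hlt i hi0 (by omega) hc
    · rename_i hc
      have hne : i ≠ m := by rintro rfl; exact hc hm
      exact ih (i + 1) (by omega) (by omega) (by omega)

-- ===== VERDICT (by name: the statement is the Claim_ definition above) =====
theorem solve_spec : Claim_equal_solve := by
  intro n _ hpre
  unfold Spec_solve solve solve_alt
  by_cases h1 : n = 1
  · simp [h1]
  · have hn2 : 2 ≤ n := by unfold Pre_solve at hpre; omega
    rw [if_neg h1, if_neg (by omega)]
    set d : Int := 12 * n - 4 with hd
    obtain ⟨hr1, hr2, hr3⟩ := newton_main d (by omega)
    set r : Int := isqrtIter d (d.toNat + 1) d with hrdef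
    -- B's value: m = (r + 9) // 6
    rw [PySem.Int.floordiv_eq_ediv_of_pos (by norm_num : (0:Int) < 6)]
    have hsix : r + 1 + 8 = r + 9 := by ring
    rw [hsix]
    set m : Int := (r + 9) / 6 with hm
    have e1 := Int.emod_nonneg (r + 9) (by norm_num : (6:Int) ≠ 0)
    have e2 := Int.emod_lt_of_pos (r + 9) (by norm_num : (0:Int) < 6)
    have e3 := Int.mul_ediv_add_emod (r + 9) 6
    have hmr : 6 * m ≤ r + 9 ∧ r + 9 < 6 * m + 6 := by constructor <;> omega
    have hr4 : 4 ≤ r := by nlinarith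
    have hm2 : 2 ≤ m := by omega
    -- m satisfies A's bracketing condition
    have hcond : 3 * (m - 1) * (m - 2) + 1 < n ∧ n ≤ 3 * m * (m - 1) + 1 := by
      constructor
      · nlinarith [hr2, sq_nonneg (r - (6 * m - 9))]
      · nlinarith [hr3, sq_nonneg ((6 * m - 3) - (r + 1))]
    -- no smaller index satisfies it
    have hlow : ∀ j : Int, 0 ≤ j → j < m →
        ¬ (3 * (j - 1) * (j - 2) + 1 < n ∧ n ≤ 3 * j * (j - 1) + 1) := by
      intro j hj0 hjm ⟨_, hub⟩
      nlinarith [hcond.1, mul_nonneg (by omega : (0:Int) ≤ m - 1 - j) (by omega : (0:Int) ≤ m - 2 + j)]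
    have hmn : m ≤ n + 1 := by nlinarith
    exact loop_finds n m hcond hlow (n.toNat + 2) 0 le_rfl (by omega) (by omega)
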